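-- pv_equiv track=rewrite | github.com/ZaBrisket/NDA-Redline-Tool | backend/app/core/redline_optimizer.py | _find_overlapping_redlines
-- ===== SOURCE A (Python) =====
-- from typing import List, Dict, Set, Tuple
--
-- def _find_overlapping_redlines(redlines: List[Dict]) -> List[List[int]]:
--     """Find groups of overlapping redlines"""
--
--     groups = []
--     used = set()
--
--     for i, redline1 in enumerate(redlines):
--         if i in used:
--             continue
--
--         group = [i]
--         start1 = redline1.get('start', 0)
--         end1 = redline1.get('end', 0)
--
--         for j, redline2 in enumerate(redlines[i+1:], i+1):
--             if j in used:
--                 continue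
--
--             start2 = redline2.get('start', 0)
--             end2 = redline2.get('end', 0)
--
--             # Check for overlap
--             if not (end1 < start2 or end2 < start1):
--                 group.append(j)
--                 used.add(j)
--
--         groups.append(group)
--         used.add(i)
--
--     return groups
-- ===== SOURCE B (Python) =====
-- def _find_overlapping_redlines(redlines):
--     """Find groups of overlapping redlines.
--
--     Single forward pass: each redline is assigned to the first existing
--     anchor group whose anchor interval overlaps it, or opens a new group
--     (no 'used' set, no rescans of later items)."""
--     table = []  # entries [group, anchor_start, anchor_end]
--     for j, r in enumerate(redlines):
--         s, e = r.get('start', 0), r.get('end', 0)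
--         for entry in table:
--             if s <= entry[2] and entry[1] <= e:
--                 entry[0].append(j)
--                 break
--         else:
--             table.append([[j], s, e])
--     return [entry[0] for entry in table]
-- ===== Notes on version B (the rewrite author's own statement) =====
-- stated objective: alternative
-- what changed: A scans, for each anchor, all later indices against a growing 'used' set; B makes one forward pass over the items, assigning each item to the first already-open anchor group whose anchor interval overlaps it (or opening a new group), so there is no used set and no rescan of later items.
import Mathlib
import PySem

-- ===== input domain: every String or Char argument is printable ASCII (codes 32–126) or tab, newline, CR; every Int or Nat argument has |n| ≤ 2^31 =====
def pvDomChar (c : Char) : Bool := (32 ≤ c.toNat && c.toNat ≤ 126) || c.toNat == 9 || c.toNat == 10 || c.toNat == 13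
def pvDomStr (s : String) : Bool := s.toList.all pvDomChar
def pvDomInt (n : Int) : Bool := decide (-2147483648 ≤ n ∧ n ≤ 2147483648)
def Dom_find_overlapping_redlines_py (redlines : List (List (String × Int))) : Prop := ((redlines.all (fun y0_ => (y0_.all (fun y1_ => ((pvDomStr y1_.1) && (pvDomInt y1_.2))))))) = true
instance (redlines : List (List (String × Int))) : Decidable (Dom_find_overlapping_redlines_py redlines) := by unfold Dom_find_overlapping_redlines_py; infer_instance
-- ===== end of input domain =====

-- B replaces A's per-anchor scan over later indices (with a 'used' set) by a single forward pass
-- assigning each item to the first open anchor group overlapping it (objective: alternative, same cost).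

-- ===== PORT A =====
-- redline.get('start', 0) / .get('end', 0): first-match association-list lookup with default 0
def pvGet (r : List (String × Int)) (k : String) : Int := ((r.find? (·.1 == k)).map (·.2)).getD 0

def find_overlapping_redlines_py (redlines : List (List (String × Int))) : List (List Int) :=
  ((PySem.List.enumerate redlines 0).foldl
    (fun st p =>
      if PySem.Set.contains st.2 p.1 then st
      else
        let s1 := pvGet p.2 "start"
        let e1 := pvGet p.2 "end"
        let inner :=
          (PySem.List.enumerate (PySem.List.slice redlines (some (p.1 + 1)) none) (p.1 + 1)).foldl
            (fun st2 q =>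
              if PySem.Set.contains st2.2 q.1 then st2
              else
                if ¬ (e1 < pvGet q.2 "start" ∨ pvGet q.2 "end" < s1) then
                  (st2.1 ++ [q.1], PySem.Set.add st2.2 q.1)
                else st2)
            ([p.1], st.2)
        (st.1 ++ [inner.1], PySem.Set.add inner.2 p.1))
    ([], PySem.Set.empty)).1

-- ===== PORT B =====
-- the inner 'for entry in table: … break / else append' of Source B: give j to the first
-- overlapping anchor entry, else open a new entry at the end
def pvAssign (table : List (List Int × Int × Int)) (j s e : Int) : List (List Int × Int × Int) :=
  match table with
  | [] => [([j], s, e)]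
  | (g, sa, ea) :: t =>
    if s ≤ ea ∧ sa ≤ e then (g ++ [j], sa, ea) :: t
    else (g, sa, ea) :: pvAssign t j s e

def find_overlapping_redlines_py_alt (redlines : List (List (String × Int))) : List (List Int) :=
  ((PySem.List.enumerate redlines 0).foldl
    (fun table p => pvAssign table p.1 (pvGet p.2 "start") (pvGet p.2 "end")) []).map (·.1)

-- ===== PRECONDITION & SPEC =====
def Spec_find_overlapping_redlines_py (redlines : List (List (String × Int))) (out : List (List Int)) : Prop := out = find_overlapping_redlines_py_alt redlines
instance (redlines : List (List (String × Int))) (out : List (List Int)) : Decidable (Spec_find_overlapping_redlines_py redlines out) := by unfold Spec_find_overlapping_redlines_py; infer_instance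

-- ===== CLAIM (what is proved, stated in full; the proofs are below) =====
def Claim_equal_find_overlapping_redlines_py : Prop := ∀ (redlines : List (List (String × Int))), Dom_find_overlapping_redlines_py redlines → Spec_find_overlapping_redlines_py redlines (find_overlapping_redlines_py redlines)

-- ===== LEMMAS AND PROOFS =====

-- proof-only bridge: (i, r.get('start',0), r.get('end',0)) per enumerated redline
def pvTriple (q : Int × List (String × Int)) : Int × Int × Int :=
  (q.1, pvGet q.2 "start", pvGet q.2 "end")

def pvTriples (redlines : List (List (String × Int))) : List (Int × Int × Int) :=
  (PySem.List.enumerate redlines 0).map pvTriple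

-- proof-only bridge: the grouping as a top-down partition recursion; both ports are proved equal to it
def pvBLoop : List (Int × Int × Int) → List (List Int)
  | [] => []
  | (i, s1, e1) :: rest =>
    let pr := rest.partition (fun t => t.2.1 ≤ e1 && s1 ≤ t.2.2)
    (i :: pr.1.map (·.1)) :: pvBLoop pr.2
termination_by l => l.length
decreasing_by
  simp only [List.partition_eq_filter_filter]
  exact Nat.lt_succ_of_le (List.length_filter_le _ _)

-- selection predicate of A's inner loop relative to a fixed used-set
def pvSel (u : PySem.Set Int) (s1 e1 : Int) (q : Int × List (String × Int)) : Bool :=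
  !(PySem.Set.contains u q.1) && !(decide (e1 < pvGet q.2 "start" ∨ pvGet q.2 "end" < s1))

lemma pvMemMapFstFilter {α : Type} (l : List (Int × α)) (f : Int × α → Bool)
    (hnd : (l.map Prod.fst).Nodup) (q : Int × α) (hq : q ∈ l) :
    (q.1 ∈ (l.filter f).map Prod.fst) ↔ f q = true := by
  induction l with
  | nil => cases hq
  | cons p t ih =>
    simp only [List.map_cons, List.nodup_cons] at hnd
    rcases List.mem_cons.mp hq with rfl | hqt
    · by_cases hf : f q = true
      · simp [hf]
      · have hf' : f q = false := by simpa using hf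
        rw [List.filter_cons, hf']
        simp only [Bool.false_eq_true, if_false, iff_false]
        intro hmem
        rcases List.mem_map.mp hmem with ⟨p, hp, hp1⟩
        exact hnd.1 (hp1 ▸ List.mem_map_of_mem (List.mem_of_mem_filter hp))
    · have hne : q.1 ≠ p.1 := by
        intro h
        exact hnd.1 (h ▸ List.mem_map_of_mem hqt)
      rw [← ih hnd.2 hqt]
      by_cases hf : f p = true <;> simp [hf, hne]

-- A's inner loop characterised

lemma pvInnerSpec (s1 e1 : Int) (pairs : List (Int × List (String × Int)))
    (hnd : (pairs.map Prod.fst).Nodup) (g : List Int) (u : PySem.Set Int) :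
    pairs.foldl (fun st2 q =>
      if PySem.Set.contains st2.2 q.1 then st2
      else
        if ¬ (e1 < pvGet q.2 "start" ∨ pvGet q.2 "end" < s1) then
          (st2.1 ++ [q.1], PySem.Set.add st2.2 q.1)
        else st2) (g, u)
    = (g ++ (pairs.filter (pvSel u s1 e1)).map Prod.fst,
       u ++ (pairs.filter (pvSel u s1 e1)).map Prod.fst) := by
  induction pairs generalizing g u with
  | nil => simp
  | cons q t ih =>
    simp only [List.map_cons, List.nodup_cons] at hnd
    by_cases hc : PySem.Set.contains u q.1 = true
    · have hsel : pvSel u s1 e1 q = false := by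
        simp only [pvSel, hc, Bool.not_true, Bool.false_and]
      simp only [List.foldl_cons, if_pos hc, List.filter_cons, hsel, Bool.false_eq_true,
        ite_false]
      exact ih hnd.2 g u
    · have hcf : PySem.Set.contains u q.1 = false := by simpa using hc
      by_cases hov : ¬ (e1 < pvGet q.2 "start" ∨ pvGet q.2 "end" < s1)
      · have hsel : pvSel u s1 e1 q = true := by
          simp only [pvSel, hcf, Bool.not_false, Bool.true_and, Bool.not_eq_true',
            decide_eq_false_iff_not]
          exact hov
        have hadd : PySem.Set.add u q.1 = u ++ [q.1] := by
          apply PySem.Set.add_of_not_mem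
          simpa using hc
        have hcongr : t.filter (pvSel (u ++ [q.1]) s1 e1) = t.filter (pvSel u s1 e1) := by
          apply List.filter_congr
          intro r hr
          have hrne : r.1 ≠ q.1 := by
            intro h
            exact hnd.1 (h ▸ List.mem_map_of_mem hr)
          simp [pvSel, hrne]
        simp only [List.foldl_cons, if_neg hc, if_pos hov, hadd]
        rw [ih hnd.2 (g ++ [q.1]) (u ++ [q.1])]
        simp [hsel, hcongr]
      · have hsel : pvSel u s1 e1 q = false := by
          have : (e1 < pvGet q.2 "start" ∨ pvGet q.2 "end" < s1) := not_not.mp hov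
          simp only [pvSel, hcf, Bool.not_false, Bool.true_and, Bool.not_eq_false',
            decide_eq_true_eq]
          exact this
        simp only [List.foldl_cons, if_neg hc, if_neg hov, List.filter_cons, hsel,
          Bool.false_eq_true, ite_false]
        exact ih hnd.2 g u

lemma pvBLoop_cons (i s1 e1 : Int) (rest : List (Int × Int × Int)) :
    pvBLoop ((i, s1, e1) :: rest)
      = (i :: (rest.filter (fun t => t.2.1 ≤ e1 && s1 ≤ t.2.2)).map (·.1))
        :: pvBLoop (rest.filter (not ∘ fun t => decide (t.2.1 ≤ e1) && decide (s1 ≤ t.2.2))) := by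
  rw [pvBLoop]
  simp only [List.partition_eq_filter_filter]

lemma pvSelEq (u : PySem.Set Int) (s1 e1 : Int) (q : Int × List (String × Int)) :
    ((decide (pvGet q.2 "start" ≤ e1) && decide (s1 ≤ pvGet q.2 "end")) && !(PySem.Set.contains u q.1))
      = pvSel u s1 e1 q := by
  simp only [pvSel]
  by_cases h1 : pvGet q.2 "start" ≤ e1 <;> by_cases h2 : s1 ≤ pvGet q.2 "end" <;>
    cases PySem.Set.contains u q.1 <;>
      first
        | (simp [h1, h2]; omega)
        | simp [h1, h2]

lemma pvOuterSpec (redlines : List (List (String × Int))) (l : List (List (String × Int))) :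
    ∀ (k : Nat) (groups : List (List Int)) (u : PySem.Set Int),
    l = redlines.drop k →
    ((PySem.List.enumerate l (k : Int)).foldl
      (fun st p =>
        if PySem.Set.contains st.2 p.1 then st
        else
          let s1 := pvGet p.2 "start"
          let e1 := pvGet p.2 "end"
          let inner :=
            (PySem.List.enumerate (PySem.List.slice redlines (some (p.1 + 1)) none) (p.1 + 1)).foldl
              (fun st2 q =>
                if PySem.Set.contains st2.2 q.1 then st2
                else
                  if ¬ (e1 < pvGet q.2 "start" ∨ pvGet q.2 "end" < s1) then
                    (st2.1 ++ [q.1], PySem.Set.add st2.2 q.1)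
                  else st2)
              ([p.1], st.2)
          (st.1 ++ [inner.1], PySem.Set.add inner.2 p.1)) (groups, u)).1
    = groups ++ pvBLoop (((PySem.List.enumerate l (k : Int)).filter
        (fun p => !(PySem.Set.contains u p.1))).map pvTriple) := by
  induction l with
  | nil => intro k groups u _; simp [pvBLoop]
  | cons r rest ih =>
    intro k groups u hl
    have htail : rest = redlines.drop (k + 1) := by
      have := congrArg List.tail hl
      simpa [List.tail_drop] using this
    have hcast : (k : Int) + 1 = ((k + 1 : Nat) : Int) := by push_cast; ring
    have hslice : PySem.List.slice redlines (some ((k : Int) + 1)) none = rest := by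
      rw [hcast, PySem.List.slice_from_natCast, ← htail]
    have hnd : ((PySem.List.enumerate rest ((k : Int) + 1)).map Prod.fst).Nodup := by
      have hp := PySem.List.pairwise_lt_enumerate (xs := rest) (s := (k : Int) + 1)
      exact (List.Pairwise.map Prod.fst (fun a b h => h) hp).imp Int.ne_of_lt
    have hge : ∀ p ∈ PySem.List.enumerate rest ((k : Int) + 1), (k : Int) + 1 ≤ p.1 := by
      intro p hp
      rcases (PySem.List.mem_enumerate_iff _ _ _).mp hp with ⟨j, hj, rfl⟩
      simp
    rw [PySem.List.enumerate_cons]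
    by_cases hc : PySem.Set.contains u (k : Int) = true
    · rw [List.foldl_cons, if_pos hc, List.filter_cons]
      simp only [hc, Bool.not_true, Bool.false_eq_true, if_false]
      rw [hcast] at *
      exact ih (k + 1) groups u htail
    · have hcf : PySem.Set.contains u (k : Int) = false := by simpa using hc
      have hknotu : (k : Int) ∉ u := by simpa using hcf
      rw [List.foldl_cons, if_neg hc]
      simp only [hslice]
      rw [pvInnerSpec (pvGet r "start") (pvGet r "end") _ hnd [(k : Int)] u]
      set s1 := pvGet r "start" with hs1
      set e1 := pvGet r "end" with he1
      set OV := ((PySem.List.enumerate rest ((k : Int) + 1)).filter (pvSel u s1 e1)).map Prod.fst with hOV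
      have hkOV : (k : Int) ∉ OV := by
        intro hmem
        rcases List.mem_map.mp hmem with ⟨p, hp, hp1⟩
        have := hge p (List.mem_of_mem_filter hp)
        omega
      have hadd : PySem.Set.add (u ++ OV) (k : Int) = (u ++ OV) ++ [(k : Int)] := by
        apply PySem.Set.add_of_not_mem
        intro h
        rcases List.mem_append.mp h with h | h
        · exact hknotu h
        · exact hkOV h
      rw [hadd]
      rw [hcast] at *
      rw [ih (k + 1) (groups ++ [[((k : Nat) : Int)] ++ OV]) ((u ++ OV) ++ [((k : Nat) : Int)]) htail]
      -- now both sides are groups ++ [...] ++ pvBLoop(...) vs groups ++ pvBLoop((head) :: ...)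
      rw [List.filter_cons]
      simp only [hcf, Bool.not_false, if_true, List.map_cons]
      have htri : pvTriple (((k : Nat) : Int), r) = (((k : Nat) : Int), s1, e1) := rfl
      rw [htri, pvBLoop_cons]
      rw [List.append_assoc, List.singleton_append]
      congr 2
      · -- group heads agree
        rw [List.filter_map, List.map_map, List.filter_filter, hOV]
        have hfun : ((fun (x : Int × Int × Int) => x.1) ∘ pvTriple)
            = (Prod.fst : Int × List (String × Int) → Int) := by
          funext q; rfl
        rw [hfun, List.singleton_append]
        exact congrArg (List.cons _)
          (congrArg (List.map Prod.fst)
            (List.filter_congr (fun q _ => (pvSelEq u s1 e1 q).symm)))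
      · -- remaining items agree
        rw [List.filter_map, List.filter_filter]
        refine congrArg pvBLoop (congrArg (List.map pvTriple) (List.filter_congr ?_))
        intro q hq
        have hqk : q.1 ≠ ((k : Nat) : Int) := by
          have := hge q hq
          omega
        have hOViff := pvMemMapFstFilter _ (pvSel u s1 e1) hnd q hq
        rw [← hOV] at hOViff
        by_cases hb : q.1 ∈ u
        · have hcb : PySem.Set.contains u q.1 = true := by
            simpa using hb
          have hcb2 : PySem.Set.contains (u ++ OV ++ [((k : Nat) : Int)]) q.1 = true := by
            simp [hb]
          simp [hb]
        · have hcb : PySem.Set.contains u q.1 = false := by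
            simpa using hb
          by_cases hovq : (e1 < pvGet q.2 "start" ∨ pvGet q.2 "end" < s1)
          · have hsel : pvSel u s1 e1 q = false := by
              simp only [pvSel, hcb, Bool.not_false, Bool.true_and, Bool.not_eq_false',
                decide_eq_true_eq]
              exact hovq
            have hnotOV : q.1 ∉ OV := fun h => by simp [hOViff.mp h] at hsel
            simp [hb, hnotOV, hqk, pvTriple]
            omega
          · have hsel : pvSel u s1 e1 q = true := by
              simp only [pvSel, hcb, Bool.not_false, Bool.true_and, Bool.not_eq_true',
                decide_eq_false_iff_not]
              exact hovq
            have hinOV : q.1 ∈ OV := hOViff.mpr hsel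
            simp [hb, hinOV, pvTriple]
            omega

-- B's fold characterised: a state headed by an anchor (g, sa, ea) absorbs exactly the
-- items overlapping that anchor, in order; the rest fold into the tail state.
lemma pvAssignFold (l : List (Int × Int × Int)) :
    ∀ (g : List Int) (sa ea : Int) (st : List (List Int × Int × Int)),
    l.foldl (fun table t => pvAssign table t.1 t.2.1 t.2.2) ((g, sa, ea) :: st)
      = (g ++ (l.filter (fun t => t.2.1 ≤ ea && sa ≤ t.2.2)).map (·.1), sa, ea)
        :: (l.filter (not ∘ fun t => decide (t.2.1 ≤ ea) && decide (sa ≤ t.2.2))).foldl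
             (fun table t => pvAssign table t.1 t.2.1 t.2.2) st := by
  induction l with
  | nil => intro g sa ea st; simp
  | cons t rest ih =>
    intro g sa ea st
    by_cases hov : t.2.1 ≤ ea ∧ sa ≤ t.2.2
    · have hb : (decide (t.2.1 ≤ ea) && decide (sa ≤ t.2.2)) = true := by
        simp [hov.1, hov.2]
      rw [List.foldl_cons]
      rw [show pvAssign ((g, sa, ea) :: st) t.1 t.2.1 t.2.2 = (g ++ [t.1], sa, ea) :: st from by
        rw [pvAssign, if_pos hov]]
      rw [ih (g ++ [t.1]) sa ea st, List.filter_cons, List.filter_cons]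
      simp [hb]
    · have hb : (decide (t.2.1 ≤ ea) && decide (sa ≤ t.2.2)) = false := by
        rcases not_and_or.mp hov with h | h
        · simp [h]
        · simp [h]
      rw [List.foldl_cons]
      rw [show pvAssign ((g, sa, ea) :: st) t.1 t.2.1 t.2.2
            = (g, sa, ea) :: pvAssign st t.1 t.2.1 t.2.2 from by
        rw [pvAssign, if_neg hov]]
      rw [ih g sa ea (pvAssign st t.1 t.2.1 t.2.2), List.filter_cons, List.filter_cons]
      simp [hb]

-- B's fold from the empty table computes the partition recursion
lemma pvFoldEqBLoop : ∀ (n : Nat) (l : List (Int × Int × Int)), l.length ≤ n →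
    ((l.foldl (fun table t => pvAssign table t.1 t.2.1 t.2.2) []).map (·.1)) = pvBLoop l := by
  intro n
  induction n with
  | zero =>
    intro l hl
    rw [List.length_eq_zero_iff.mp (Nat.le_zero.mp hl)]
    simp [pvBLoop]
  | succ n ih =>
    intro l hl
    match l with
    | [] => simp [pvBLoop]
    | (i, s1, e1) :: rest =>
      rw [List.foldl_cons]
      show (((rest.foldl (fun table t => pvAssign table t.1 t.2.1 t.2.2) [([i], s1, e1)]).map (·.1)) = _)
      rw [pvAssignFold rest [i] s1 e1 []]
      rw [pvBLoop_cons, List.map_cons]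
      have hlen : (rest.filter (not ∘ fun t => decide (t.2.1 ≤ e1) && decide (s1 ≤ t.2.2))).length ≤ n := by
        have := List.length_filter_le (not ∘ fun t : Int × Int × Int => decide (t.2.1 ≤ e1) && decide (s1 ≤ t.2.2)) rest
        simp only [List.length_cons, Nat.succ_le_succ_iff] at hl
        omega
      rw [ih _ hlen]
      simp

-- ===== VERDICT (by name: the statement is the Claim_ definition above) =====
theorem find_overlapping_redlines_py_spec : Claim_equal_find_overlapping_redlines_py := by
  intro redlines _
  unfold Spec_find_overlapping_redlines_py
  unfold find_overlapping_redlines_py find_overlapping_redlines_py_alt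
  have hA := pvOuterSpec redlines redlines 0 [] PySem.Set.empty (by simp)
  simp only [Nat.cast_zero] at hA
  rw [hA]
  have hB : (PySem.List.enumerate redlines 0).foldl
      (fun table p => pvAssign table p.1 (pvGet p.2 "start") (pvGet p.2 "end")) []
      = (pvTriples redlines).foldl (fun table t => pvAssign table t.1 t.2.1 t.2.2) [] := by
    rw [pvTriples, List.foldl_map]
    rfl
  rw [hB, pvFoldEqBLoop (pvTriples redlines).length _ le_rfl]
  simp [PySem.Set.empty, pvTriples]
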